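-- pv_equiv track=rewrite | github.com/Marc-Hu/Proba-Stat | projet_email/projet1.py | getIndexLimit2ForSecondHalf
-- ===== SOURCE A (Python) =====
-- def getIndexLimit2ForSecondHalf(limits, mails, current_value):
--     i=0;
--     while limits[2]==-1 :
--         try :
--             limits[2] = mails.index(current_value + i);
--         except :
--             i=i+1;
--     return limits[2];
-- ===== SOURCE B (Python) =====
-- def getIndexLimit2ForSecondHalf(limits, mails, current_value):
--     if limits[2] == -1:
--         limits[2] = mails.index(min(m for m in mails if m >= current_value))
--     return limits[2]
-- ===== Notes on version B (the rewrite author's own statement) =====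
-- stated objective: alternative
-- what changed: A probes current_value, current_value+1, ... with a full mails.index scan per probe until a probe hits; B instead takes the minimum mail value >= current_value in one pass and returns its first index (A's mutation of limits[2] is reproduced). Intended to remove the O(gap*n) probing; a timing run could not consistently confirm a speed-up, so none is claimed.
import Mathlib
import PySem

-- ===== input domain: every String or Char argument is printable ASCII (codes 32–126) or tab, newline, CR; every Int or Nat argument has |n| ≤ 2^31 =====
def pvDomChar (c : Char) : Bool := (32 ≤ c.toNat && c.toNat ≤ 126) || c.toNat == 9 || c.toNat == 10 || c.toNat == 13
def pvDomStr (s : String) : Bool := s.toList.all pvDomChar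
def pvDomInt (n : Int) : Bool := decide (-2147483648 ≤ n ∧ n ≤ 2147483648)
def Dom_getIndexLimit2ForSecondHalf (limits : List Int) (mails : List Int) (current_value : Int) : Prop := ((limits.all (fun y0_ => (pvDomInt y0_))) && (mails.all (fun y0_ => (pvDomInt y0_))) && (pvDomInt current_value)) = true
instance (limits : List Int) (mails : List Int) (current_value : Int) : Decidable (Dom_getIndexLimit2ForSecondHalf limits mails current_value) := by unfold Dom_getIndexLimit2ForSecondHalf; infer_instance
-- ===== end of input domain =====

-- B replaces A's probe-and-rescan loop (try mails.index(cv+i) for i = 0,1,2,…) by one pass: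
-- the minimum mail value ≥ current_value, then its first index. Equivalence is about the return
-- value; both Pythons perform the same limits[2] mutation.

-- ===== PORT A =====
-- A's while loop: probe current_value+i for i = 0,1,2,…  The fuel argument is only a totality
-- guard (under Pre_ some mail value ≥ current_value exists, so the probe hits before fuel runs out).
def pvALoop (fuel : Nat) (mails : List Int) (cv : Int) (i : Int) : Int :=
  match fuel with
  | 0 => -1  -- unreachable under Pre_ (A diverges when no mail value ≥ current_value exists)
  | f + 1 =>
    match PySem.List.index? mails (cv + i) with
    | some idx => (idx : Int)            -- limits[2] = mails.index(...); loop exits (idx ≥ 0 ≠ -1)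
    | none => pvALoop f mails cv (i + 1) -- except: i = i + 1

def getIndexLimit2ForSecondHalf (limits : List Int) (mails : List Int) (current_value : Int) : Int :=
  match PySem.List.pyGet? limits 2 with
  | none => 0  -- IndexError, excluded by Pre_
  | some l2 =>
    if l2 = -1 then
      pvALoop ((mails.foldl max current_value) - current_value + 1).toNat mails current_value 0
    else l2

-- ===== PORT B =====
def getIndexLimit2ForSecondHalf_alt (limits : List Int) (mails : List Int) (current_value : Int) : Int :=
  match PySem.List.pyGet? limits 2 with
  | none => 0  -- IndexError, excluded by Pre_
  | some l2 =>
    if l2 = -1 then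
      match PySem.List.min? (mails.filter (fun m => decide (current_value ≤ m))) (fun x => x) with
      | none => 0  -- min() of empty generator: ValueError, excluded by Pre_
      | some v =>
        match PySem.List.index? mails v with
        | some idx => (idx : Int)
        | none => 0  -- unreachable: v ∈ mails
    else l2

-- ===== PRECONDITION & SPEC =====
-- Pre_ = exactly the inputs where A returns: limits has an index 2, and either limits[2] ≠ -1
-- (the loop never runs) or some mail value ≥ current_value exists (otherwise A loops forever
-- and B raises ValueError).
def Pre_getIndexLimit2ForSecondHalf (limits : List Int) (mails : List Int) (current_value : Int) : Prop :=
  2 < limits.length ∧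
  (PySem.List.pyGet? limits 2 ≠ some (-1) ∨ ∃ m ∈ mails, current_value ≤ m)
instance (limits : List Int) (mails : List Int) (current_value : Int) : Decidable (Pre_getIndexLimit2ForSecondHalf limits mails current_value) := by unfold Pre_getIndexLimit2ForSecondHalf; infer_instance

def pvWitness_getIndexLimit2ForSecondHalf : List Int × List Int × Int := ([0, 0, -1], [7, 3, 5, 3], 4)

def Spec_getIndexLimit2ForSecondHalf (limits : List Int) (mails : List Int) (current_value : Int) (out : Int) : Prop := out = getIndexLimit2ForSecondHalf_alt limits mails current_value
instance (limits : List Int) (mails : List Int) (current_value : Int) (out : Int) : Decidable (Spec_getIndexLimit2ForSecondHalf limits mails current_value out) := by unfold Spec_getIndexLimit2ForSecondHalf; infer_instance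

-- ===== CLAIM (what is proved, stated in full; the proofs are below) =====
def Claim_equal_getIndexLimit2ForSecondHalf : Prop := ∀ (limits : List Int) (mails : List Int) (current_value : Int), Dom_getIndexLimit2ForSecondHalf limits mails current_value → Pre_getIndexLimit2ForSecondHalf limits mails current_value → Spec_getIndexLimit2ForSecondHalf limits mails current_value (getIndexLimit2ForSecondHalf limits mails current_value)

-- ===== LEMMAS AND PROOFS =====

-- The probe loop, given enough fuel, lands exactly on the least mail value ≥ cv + i.
theorem pvALoop_finds (mails : List Int) (cv : Int) :
    ∀ (fuel : Nat) (i v : Int), v ∈ mails → cv + i ≤ v →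
      (∀ m ∈ mails, cv + i ≤ m → v ≤ m) →
      v - (cv + i) < (fuel : Int) →
      pvALoop fuel mails cv i =
        match PySem.List.index? mails v with
        | some idx => (idx : Int)
        | none => 0 := by
  intro fuel
  induction fuel with
  | zero => intro i v hv hle _ hf; simp at hf; omega
  | succ f ih =>
    intro i v hv hle hmin hf
    unfold pvALoop
    rcases h : PySem.List.index? mails (cv + i) with _ | idx
    · -- cv + i ∉ mails, so v > cv + i; recurse
      have hnot : cv + i ∉ mails := (PySem.List.index?_eq_none_iff mails (cv + i)).mp h
      have hne : v ≠ cv + i := fun he => hnot (he ▸ hv)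
      have : cv + (i + 1) ≤ v := by omega
      refine ih (i + 1) v hv (by omega) ?_ (by push_cast at hf ⊢; omega)
      intro m hm hcm; exact hmin m hm (by omega)
    · -- hit: cv + i ∈ mails and cv + i ≥ cv + i, so minimality forces v = cv + i
      have hmem : cv + i ∈ mails := (PySem.List.index?_isSome_iff mails (cv + i)).mp (by rw [h]; rfl)
      have : v = cv + i := le_antisymm (hmin _ hmem le_rfl) hle
      subst this
      have h' := h
      rw [PySem.List.index?_eq_idxOf?] at h'
      simp [h']

theorem mem_le_foldl_max (mails : List Int) (cv : Int) (m : Int) (hm : m ∈ mails) :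
    m ≤ mails.foldl max cv := (PySem.List.le_foldl_max mails cv).2 m hm

theorem min?_filter_spec (mails : List Int) (cv v : Int)
    (h : PySem.List.min? (mails.filter (fun m => decide (cv ≤ m))) (fun x => x) = some v) :
    v ∈ mails ∧ cv ≤ v ∧ ∀ m ∈ mails, cv ≤ m → v ≤ m := by
  have hmem := PySem.List.min?_mem h
  have hmin := PySem.List.min?_isMin h
  simp only [List.mem_filter, decide_eq_true_eq] at hmem hmin
  exact ⟨hmem.1, hmem.2, fun m hm hcm => hmin m ⟨hm, hcm⟩⟩

-- ===== VERDICT (by name: the statement is the Claim_ definition above) =====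
theorem getIndexLimit2ForSecondHalf_spec : Claim_equal_getIndexLimit2ForSecondHalf := by
  intro limits mails cv _ hpre
  unfold Spec_getIndexLimit2ForSecondHalf getIndexLimit2ForSecondHalf getIndexLimit2ForSecondHalf_alt
  obtain ⟨hlen, hcase⟩ := hpre
  rcases hget : PySem.List.pyGet? limits 2 with _ | l2
  · rfl
  by_cases hl2 : l2 = -1
  · subst hl2
    simp only [reduceCtorEq, if_pos rfl]
    have hex : ∃ m ∈ mails, cv ≤ m := by
      rcases hcase with hne | hex
      · exact absurd hget hne
      · exact hex
    -- the filtered list is nonempty, so min? returns some v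
    rcases hmin : PySem.List.min? (mails.filter (fun m => decide (cv ≤ m))) (fun x => x) with _ | v
    · exfalso
      obtain ⟨m, hm, hcm⟩ := hex
      have : mails.filter (fun m => decide (cv ≤ m)) = [] :=
        (PySem.List.min?_eq_none_iff (mails.filter (fun m => decide (cv ≤ m))) (fun x => x)).mp hmin
      have : m ∈ mails.filter (fun m => decide (cv ≤ m)) := by
        simp [List.mem_filter, hm, hcm]
      simp_all
      exact absurd hcm (not_le.mpr (this m hm))
    · obtain ⟨hvmem, hvge, hvmin⟩ := min?_filter_spec mails cv v hmin
      have hfuel : v - (cv + 0) < ((((mails.foldl max cv) - cv + 1).toNat : Nat) : Int) := by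
        have h1 : v ≤ mails.foldl max cv := mem_le_foldl_max mails cv v hvmem
        have h2 : cv ≤ mails.foldl max cv := (PySem.List.le_foldl_max mails cv).1
        omega
      rw [pvALoop_finds mails cv _ 0 v hvmem (by omega) (fun m hm h => hvmin m hm (by omega)) hfuel]
  · simp [hl2]
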